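-- pv_equiv track=rewrite | github.com/art6803/iso8583tohtml | iso8583.py | bitmap_campos
-- ===== SOURCE A (Python) =====
-- def bitmap_campos(hexbitmap, incremento = 0, lista = True):
--
--     if type(hexbitmap) is list:
--         lst = hexbitmap
--     else:
--         lst = hexbitmap.split()
--
--     map = ''
--     for v in lst:
--         if len(v) == 2:
--             numbin = bin(int(v, 16)).replace('0b', '').zfill(8)
--             map += numbin
--     if lista:
--         campos = []
--         i = 1
--         for num in map:
--             if num == '1':
--                 campos.append(i + incremento )
--             i += 1
--         return campos
--     else:
--         return map
-- ===== SOURCE B (Python) =====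
-- def bitmap_campos(hexbitmap, incremento=0, lista=True):
--     if type(hexbitmap) is list:
--         lst = hexbitmap
--     else:
--         lst = hexbitmap.split()
--     if lista:
--         campos = []
--         count = 0
--         for v in lst:
--             if len(v) == 2:
--                 val = int(v, 16)
--                 for j in range(8):
--                     if (val >> (7 - j)) & 1:
--                         campos.append(8 * count + j + 1 + incremento)
--                 count += 1
--         return campos
--     else:
--         mapa = ''
--         for v in lst:
--             if len(v) == 2:
--                 mapa += bin(int(v, 16)).replace('0b', '').zfill(8)
--         return mapa
-- ===== Notes on version B (the rewrite author's own statement) =====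
-- stated objective: alternative
-- what changed: For lista=True, B never builds the concatenated binary string: it iterates the valid length-2 bytes with a counter and extracts set-bit positions directly by integer bit-masking ((val >> (7-j)) & 1), instead of A's build-string-then-scan-characters pass; for lista=False B reproduces A's string result exactly (that branch returns a str, outside the Lean List Int return type, so the Lean claim covers lista=True).
-- outside the precondition, e.g. on bitmap_campos('ff 40', 0, False): A returns '1111111101000000', B returns '1111111101000000'; on bitmap_campos('g1', 0, True): A raises ValueError, B raises ValueError; on bitmap_campos('-1', 0, True): A returns [8], B returns [1, 2, 3, 4, 5, 6, 7, 8]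
import Mathlib
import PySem

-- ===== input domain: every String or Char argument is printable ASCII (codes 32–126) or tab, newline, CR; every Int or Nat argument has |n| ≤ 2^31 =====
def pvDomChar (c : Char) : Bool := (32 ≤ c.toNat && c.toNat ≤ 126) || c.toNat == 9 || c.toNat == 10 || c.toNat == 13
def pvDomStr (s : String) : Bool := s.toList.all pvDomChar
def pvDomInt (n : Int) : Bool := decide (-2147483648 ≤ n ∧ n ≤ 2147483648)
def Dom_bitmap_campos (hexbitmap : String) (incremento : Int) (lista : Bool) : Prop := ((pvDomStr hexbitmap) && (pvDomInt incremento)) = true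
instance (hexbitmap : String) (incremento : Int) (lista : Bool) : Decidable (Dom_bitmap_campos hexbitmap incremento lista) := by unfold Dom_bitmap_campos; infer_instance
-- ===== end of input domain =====

-- B iterates the valid length-2 bytes with a counter and extracts set-bit positions by integer
-- bit-masking, instead of A's building of a concatenated binary string that is then scanned char by
-- char; on lista = false B's Python reproduces A's string verbatim (outside this file's List Int claim).


-- ===== PORT A =====
-- one iteration of A's first loop: map += bin(int(v, 16)).replace('0b', '').zfill(8) if len(v) == 2
def pvMapByte (m : List Char) (v : String) : List Char :=
  if PySem.Str.len v == 2 then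
    match PySem.Int.ofStrBase? v 16 with
    | some n => m ++ PySem.Chars.zfill (PySem.Int.toBinChars n) 8
    | none => m     -- int(v, 16) raises ValueError in Python: excluded by Pre_
  else m

-- one iteration of A's second loop (state = (campos, i))
def pvScanStep (incremento : Int) (st : List Int × Int) (num : Char) : List Int × Int :=
  if num == '1' then (st.1 ++ [st.2 + incremento], st.2 + 1) else (st.1, st.2 + 1)

def bitmap_campos (hexbitmap : String) (incremento : Int) (lista : Bool) : List Int :=
  let lst := PySem.Str.split₀ hexbitmap
  let map : List Char := lst.foldl pvMapByte []
  if lista then (map.foldl (pvScanStep incremento) ([], 1)).1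
  else []     -- Python returns the STRING map here, not a List Int: excluded by Pre_

-- ===== PORT B =====
-- B's inner loop: for j in range(8): if (val >> (7 - j)) & 1: campos.append(8 * count + j + 1 + incremento)
def pvByteFields (incremento val count : Int) (campos : List Int) : List Int :=
  (PySem.List.pyRange 0 8 1).foldl
    (fun c j => if PySem.Int.band (val >>> (7 - j).toNat) 1 == 1 then c ++ [8 * count + j + 1 + incremento] else c)
    campos

-- one iteration of B's outer loop (state = (campos, count))
def pvStepB (incremento : Int) (st : List Int × Int) (v : String) : List Int × Int :=
  if PySem.Str.len v == 2 then
    match PySem.Int.ofStrBase? v 16 with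
    | some val => (pvByteFields incremento val st.2 st.1, st.2 + 1)
    | none => st     -- int(v, 16) raises ValueError in Python: excluded by Pre_
  else st

def bitmap_campos_alt (hexbitmap : String) (incremento : Int) (lista : Bool) : List Int :=
  if lista then ((PySem.Str.split₀ hexbitmap).foldl (pvStepB incremento) ([], 0)).1
  else []     -- Python B returns the same concatenated binary STRING as A here, not a List Int: excluded by Pre_

-- ===== PRECONDITION & SPEC =====
def pvHexChars : List Char := "0123456789abcdefABCDEF".toList

-- Pre_ excludes (a) lista = false, where both Pythons return the SAME binary string — a str, which is
-- not a value of this port's declared List Int return type, so the Lean claim cannot state it; and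
-- (b) length-2 tokens that are not two plain hex digits: on non-hex tokens A raises ValueError, and
-- signed/space-padded tokens such as '-1' or '+f' are accepted by int(v, 16) only by accident, so that
-- A then derives positions from a sign-prefixed binary string — a corner no one would specify either way.
def Pre_bitmap_campos (hexbitmap : String) (incremento : Int) (lista : Bool) : Prop :=
  lista = true ∧
  ((PySem.Str.split₀ hexbitmap).all
    (fun v => !(v.toList.length == 2) || v.toList.all (fun c => pvHexChars.contains c))) = true
instance (hexbitmap : String) (incremento : Int) (lista : Bool) : Decidable (Pre_bitmap_campos hexbitmap incremento lista) := by unfold Pre_bitmap_campos; infer_instance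

def pvWitness_bitmap_campos : String × Int × Bool := ("40 10 05 81", 0, true)

def Spec_bitmap_campos (hexbitmap : String) (incremento : Int) (lista : Bool) (out : List Int) : Prop := out = bitmap_campos_alt hexbitmap incremento lista
instance (hexbitmap : String) (incremento : Int) (lista : Bool) (out : List Int) : Decidable (Spec_bitmap_campos hexbitmap incremento lista out) := by unfold Spec_bitmap_campos; infer_instance

-- ===== CLAIM (what is proved, stated in full; the proofs are below) =====
def Claim_equal_bitmap_campos : Prop := ∀ (hexbitmap : String) (incremento : Int) (lista : Bool), Dom_bitmap_campos hexbitmap incremento lista → Pre_bitmap_campos hexbitmap incremento lista → Spec_bitmap_campos hexbitmap incremento lista (bitmap_campos hexbitmap incremento lista)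

-- ===== LEMMAS AND PROOFS =====

def pvHexVal (c : Char) : Nat :=
  match c with
  | '0' => 0 | '1' => 1 | '2' => 2 | '3' => 3 | '4' => 4 | '5' => 5 | '6' => 6 | '7' => 7
  | '8' => 8 | '9' => 9
  | 'a' => 10 | 'b' => 11 | 'c' => 12 | 'd' => 13 | 'e' => 14 | 'f' => 15
  | 'A' => 10 | 'B' => 11 | 'C' => 12 | 'D' => 13 | 'E' => 14 | 'F' => 15
  | _ => 0

set_option maxRecDepth 16384 in
theorem pvParseAll : (pvHexChars.all (fun c1 => pvHexChars.all (fun c2 =>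
    PySem.Int.ofCharsBase? [c1, c2] 16 == some ((16 * pvHexVal c1 + pvHexVal c2 : Nat) : Int)))) = true := by decide

theorem pvParse (c1 c2 : Char) (h1 : c1 ∈ pvHexChars) (h2 : c2 ∈ pvHexChars) :
    PySem.Int.ofCharsBase? [c1, c2] 16 = some ((16 * pvHexVal c1 + pvHexVal c2 : Nat) : Int) :=
  eq_of_beq (List.all_eq_true.mp (List.all_eq_true.mp pvParseAll c1 h1) c2 h2)

set_option maxRecDepth 8192 in
theorem pvValLtAll : (pvHexChars.all (fun c => decide (pvHexVal c < 16))) = true := by decide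

theorem pvValLt (c : Char) (h : c ∈ pvHexChars) : pvHexVal c < 16 :=
  of_decide_eq_true (List.all_eq_true.mp pvValLtAll c h)

set_option maxRecDepth 8192 in
theorem pvBitsAll : ((List.range 256).all (fun n => decide (PySem.Chars.zfill (PySem.Int.toBinChars ((n : Nat) : Int)) 8
    = (List.range 8).map (fun j => if (n >>> (7 - j)) &&& 1 == 1 then '1' else '0')))) = true := by decide

theorem pvBits (n : Nat) (hn : n < 256) : PySem.Chars.zfill (PySem.Int.toBinChars ((n : Nat) : Int)) 8
    = (List.range 8).map (fun j => if (n >>> (7 - j)) &&& 1 == 1 then '1' else '0') :=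
  of_decide_eq_true (List.all_eq_true.mp pvBitsAll n (List.mem_range.mpr hn))

theorem pvBlkLen (n : Nat) (hn : n < 256) :
    (PySem.Chars.zfill (PySem.Int.toBinChars ((n : Nat) : Int)) 8).length = 8 := by
  rw [pvBits n hn]; simp

theorem pvCastBand (n m : Nat) :
    (PySem.Int.band ((n : Int) >>> ((m : Nat) : Int)) 1 == 1) = ((n >>> m) &&& 1 == 1) := by
  rw [show ((n : Int) >>> ((m : Nat) : Int)) = ((n >>> m : Nat) : Int) from by simp [Int.natCast_shiftRight],
      show (1 : Int) = ((1 : Nat) : Int) from rfl, PySem.Int.band_natCast]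
  generalize (n >>> m) &&& 1 = x
  rw [Bool.eq_iff_iff]
  simp only [beq_iff_eq]
  omega

theorem pvIfChar (b : Bool) : ((if b then '1' else '0') == '1') = b := by cases b <;> decide

-- the positions of '1'-characters, counting from i, collected front to back
def pvOnes (inc : Int) : List Char → Int → List Int
  | [], _ => []
  | c :: t, i => (if c == '1' then [i + inc] else []) ++ pvOnes inc t (i + 1)

-- A's scanning loop computes pvOnes of the scanned string, prefixed by the accumulator
theorem pvScanOnes (inc : Int) (cs : List Char) (acc : List Int) (i : Int) :
    cs.foldl (pvScanStep inc) (acc, i) = (acc ++ pvOnes inc cs i, i + (cs.length : Int)) := by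
  induction cs generalizing acc i with
  | nil => simp [pvOnes]
  | cons c cs ih =>
    simp only [List.foldl_cons, pvOnes]
    by_cases hc : (c == '1') = true
    · rw [show pvScanStep inc (acc, i) c = (acc ++ [i + inc], i + 1) from by simp [pvScanStep, hc],
          ih (acc ++ [i + inc]) (i + 1)]
      simp [hc, List.append_assoc]
      ring
    · rw [show pvScanStep inc (acc, i) c = (acc, i + 1) from by simp [pvScanStep, hc],
          ih acc (i + 1)]
      simp [hc]
      ring

theorem pvOnesAppend (inc : Int) (xs ys : List Char) (i : Int) :
    pvOnes inc (xs ++ ys) i = pvOnes inc xs i ++ pvOnes inc ys (i + (xs.length : Int)) := by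
  induction xs generalizing i with
  | nil => simp [pvOnes]
  | cons x xs ih =>
    simp only [List.cons_append, pvOnes, ih (i + 1), List.append_assoc, List.length_cons]
    push_cast
    rw [show i + 1 + (xs.length : Int) = i + ((xs.length : Int) + 1) from by ring]

theorem pvBlockAux (inc : Int) (n : Nat) (k : Int) :
    ∀ (m a : Nat), a + m = 8 →
    pvOnes inc ((List.range' a m).map (fun j => if (n >>> (7 - j)) &&& 1 == 1 then '1' else '0')) (8 * k + 1 + (a : Int))
      = ((PySem.List.pyRange (a : Int) 8 1).filter
          (fun j => PySem.Int.band ((n : Int) >>> (7 - j).toNat) 1 == 1)).map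
          (fun j => 8 * k + j + 1 + inc) := by
  intro m
  induction m with
  | zero =>
    intro a ha
    rw [show (a : Nat) = 8 from by omega, PySem.List.pyRange_one_eq_nil (by norm_num)]
    simp [pvOnes]
  | succ m ih =>
    intro a ha
    rw [List.range'_succ, PySem.List.pyRange_one_cons (by exact_mod_cast by omega : (a : Int) < 8)]
    simp only [List.map_cons, pvOnes, List.filter_cons]
    rw [show (((7 : Int) - (a : Nat)).toNat) = 7 - a from by omega, pvIfChar, pvCastBand n (7 - a)]
    have hih := ih (a + 1) (by omega)
    push_cast at hih
    rw [show 8 * k + 1 + ((a : Int) + 1) = 8 * k + 1 + (a : Int) + 1 from by ring] at hih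
    by_cases hb : ((n >>> (7 - a)) &&& 1 == 1) = true
    · rw [if_pos hb, if_pos hb, hih, List.map_cons, List.singleton_append]
      congr 1
      ring
    · rw [if_neg hb, if_neg hb, hih, List.nil_append]

-- per byte: scanning the 8-character zfilled binary string of n, the counter standing at 8*k+1,
-- yields B's bit-masked positions for byte number k
theorem pvByteBlock (inc : Int) (n : Nat) (hn : n < 256) (k : Int) :
    pvOnes inc (PySem.Chars.zfill (PySem.Int.toBinChars ((n : Nat) : Int)) 8) (8 * k + 1)
      = pvByteFields inc ((n : Nat) : Int) k [] := by
  rw [pvBits n hn]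
  unfold pvByteFields
  rw [PySem.List.foldl_append_if, List.nil_append, List.range_eq_range']
  have h := pvBlockAux inc n k 8 0 (by omega)
  simp only [Nat.cast_zero, add_zero] at h
  exact h

theorem pvMapByteShift1 (m : List Char) (v : String) : pvMapByte m v = m ++ pvMapByte [] v := by
  unfold pvMapByte
  split
  · cases PySem.Int.ofStrBase? v 16 <;> simp
  · simp

theorem pvMapShift (ts : List String) (m : List Char) :
    ts.foldl pvMapByte m = m ++ ts.foldl pvMapByte [] := by
  induction ts generalizing m with
  | nil => simp
  | cons v ts ih =>
    simp only [List.foldl_cons]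
    rw [ih (pvMapByte m v), ih (pvMapByte [] v), pvMapByteShift1 m v, List.append_assoc]

theorem pvByteFieldsShift (inc val k : Int) (acc : List Int) :
    pvByteFields inc val k acc = acc ++ pvByteFields inc val k [] := by
  unfold pvByteFields
  rw [PySem.List.foldl_append_if, PySem.List.foldl_append_if]
  simp

-- main loop correspondence: B's single pass equals A's build-then-scan
theorem pvMain (inc : Int) (ts : List String)
    (hhex : ∀ v ∈ ts, v.toList.length = 2 → ∀ c ∈ v.toList, c ∈ pvHexChars) (k : Int) (acc : List Int) :
    ts.foldl (pvStepB inc) (acc, k)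
      = (acc ++ pvOnes inc (ts.foldl pvMapByte []) (8 * k + 1),
         k + (((ts.filter (fun v => v.toList.length == 2)).length : Nat) : Int)) := by
  induction ts generalizing k acc with
  | nil => simp [pvOnes]
  | cons v ts ih =>
    have hts : ∀ v ∈ ts, v.toList.length = 2 → ∀ c ∈ v.toList, c ∈ pvHexChars :=
      fun w hw => hhex w (List.mem_cons_of_mem v hw)
    have hsplit : List.foldl pvMapByte [] (v :: ts) = pvMapByte [] v ++ List.foldl pvMapByte [] ts := by
      rw [List.foldl_cons]; exact pvMapShift ts _
    by_cases hv : v.toList.length = 2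
    · obtain ⟨c1, c2, hv2⟩ := List.length_eq_two.mp hv
      have h1 : c1 ∈ pvHexChars := hhex v List.mem_cons_self hv c1 (by rw [hv2]; simp)
      have h2 : c2 ∈ pvHexChars := hhex v List.mem_cons_self hv c2 (by rw [hv2]; simp)
      have hl2 : v.length = 2 := by simpa using hv
      have hparse : PySem.Int.ofStrBase? v 16
          = some ((16 * pvHexVal c1 + pvHexVal c2 : Nat) : Int) := by
        rw [show PySem.Int.ofStrBase? v 16 = PySem.Int.ofCharsBase? v.toList 16 from by
              simp [PySem.Int.ofStrBase?], hv2]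
        exact pvParse c1 c2 h1 h2
      have hn : 16 * pvHexVal c1 + pvHexVal c2 < 256 := by
        have := pvValLt c1 h1; have := pvValLt c2 h2; omega
      have hstep : pvStepB inc (acc, k) v
          = (pvByteFields inc ((16 * pvHexVal c1 + pvHexVal c2 : Nat) : Int) k acc, k + 1) := by
        simp [pvStepB, hparse, show ((v.length : Nat) : Int) = 2 from by exact_mod_cast hl2]
      have hblk : pvMapByte [] v
          = PySem.Chars.zfill (PySem.Int.toBinChars ((16 * pvHexVal c1 + pvHexVal c2 : Nat) : Int)) 8 := by
        simp [pvMapByte, hparse, show ((v.length : Nat) : Int) = 2 from by exact_mod_cast hl2]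
      rw [List.foldl_cons, hstep, ih hts (k + 1), hsplit, pvOnesAppend, hblk,
          pvBlkLen _ hn, pvByteBlock inc _ hn k,
          show 8 * k + 1 + ((8 : Nat) : Int) = 8 * (k + 1) + 1 from by push_cast; ring,
          pvByteFieldsShift inc _ k acc,
          show (v :: ts).filter (fun v => v.toList.length == 2)
              = v :: ts.filter (fun v => v.toList.length == 2) from by simp [hl2]]
      simp only [Prod.mk.injEq, List.append_assoc, List.length_cons]
      refine ⟨by trivial, ?_⟩
      push_cast
      ring
    · have hl2 : ¬ v.length = 2 := by simpa using hv
      have hstep : pvStepB inc (acc, k) v = (acc, k) := by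
        simp [pvStepB, show ¬ ((v.length : Nat) : Int) = 2 from by exact_mod_cast hl2]
      have hblk : pvMapByte [] v = [] := by
        simp [pvMapByte, show ¬ ((v.length : Nat) : Int) = 2 from by exact_mod_cast hl2]
      rw [List.foldl_cons, hstep, ih hts k acc, hsplit, hblk, List.nil_append,
          show (v :: ts).filter (fun v => v.toList.length == 2)
              = ts.filter (fun v => v.toList.length == 2) from by simp [hl2]]

-- unpack the Boolean Pre_ into the per-token hex-digit fact pvMain consumes
theorem pvPreHex (hexbitmap : String) (incremento : Int) (lista : Bool)
    (h : Pre_bitmap_campos hexbitmap incremento lista) :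
    ∀ v ∈ PySem.Str.split₀ hexbitmap, v.toList.length = 2 → ∀ c ∈ v.toList, c ∈ pvHexChars := by
  intro v hv hlen c hc
  have h2 := List.all_eq_true.mp h.2 v hv
  rw [Bool.or_eq_true] at h2
  rcases h2 with h2 | h2
  · simp [hlen] at h2
  · simpa using List.all_eq_true.mp h2 c hc

-- ===== VERDICT (by name: the statement is the Claim_ definition above) =====
theorem bitmap_campos_spec : Claim_equal_bitmap_campos := by
  intro hexbitmap incremento lista _ hpre
  have hhex := pvPreHex hexbitmap incremento lista hpre
  obtain ⟨hl, -⟩ := hpre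
  subst hl
  unfold Spec_bitmap_campos bitmap_campos bitmap_campos_alt
  simp only [if_true]
  rw [pvMain incremento (PySem.Str.split₀ hexbitmap) hhex 0 [],
      pvScanOnes incremento _ ([] : List Int) 1]
  norm_num
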